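-- pv_equiv track=rewrite | github.com/PaddlePaddle/Research | KG/MultiFormatIE_baseline/DuIE/run_duie.py | find_entity
-- ===== SOURCE A (Python) =====
-- def find_entity(text_raw, id_, predictions, tok_to_orig_start_index, tok_to_orig_end_index):
--     """
--     retrieval entity mention under given predicate id for certain prediction.
--     this is called by the "decoding" func.
--     """
--     entity_list = []
--     for i in range(len(predictions)):
--         if [id_] in predictions[i]:
--             j = 0
--             while i + j + 1 < len(predictions):
--                 if [1] in predictions[i + j + 1]:
--                     j += 1
--                 else:
--                     break
--             entity = ''.join(text_raw[tok_to_orig_start_index[i]: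
--                                     tok_to_orig_end_index[i + j] + 1])
--             entity_list.append(entity)
--     return list(set(entity_list))
-- ===== SOURCE B (Python) =====
-- def find_entity(text_raw, id_, predictions, tok_to_orig_start_index, tok_to_orig_end_index):
--     # One backward pass precomputes, for every position k, the length of the
--     # consecutive run of [1]-containing predictions starting at k; each match
--     # then gets its span extent by one O(1) lookup instead of an inner scan.
--     run = [0]
--     for p in reversed(predictions):
--         run.append(run[-1] + 1 if [1] in p else 0)
--     run.reverse()
--     entity_list = []
--     for i, p in enumerate(predictions):
--         if [id_] in p:
--             j = run[i + 1]
--             entity_list.append(''.join(text_raw[tok_to_orig_start_index[i]: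
--                                                 tok_to_orig_end_index[i + j] + 1]))
--     return list(set(entity_list))
-- ===== Notes on version B (the rewrite author's own statement) =====
-- stated objective: alternative
-- what changed: A rescans the following positions for [1] from scratch at every matched index (quadratic worst case); B precomputes the trailing-[1]-run length of every position in one backward pass and replaces each inner while-scan by a single run-table lookup (same measured cost on the generated inputs).
import Mathlib
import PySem

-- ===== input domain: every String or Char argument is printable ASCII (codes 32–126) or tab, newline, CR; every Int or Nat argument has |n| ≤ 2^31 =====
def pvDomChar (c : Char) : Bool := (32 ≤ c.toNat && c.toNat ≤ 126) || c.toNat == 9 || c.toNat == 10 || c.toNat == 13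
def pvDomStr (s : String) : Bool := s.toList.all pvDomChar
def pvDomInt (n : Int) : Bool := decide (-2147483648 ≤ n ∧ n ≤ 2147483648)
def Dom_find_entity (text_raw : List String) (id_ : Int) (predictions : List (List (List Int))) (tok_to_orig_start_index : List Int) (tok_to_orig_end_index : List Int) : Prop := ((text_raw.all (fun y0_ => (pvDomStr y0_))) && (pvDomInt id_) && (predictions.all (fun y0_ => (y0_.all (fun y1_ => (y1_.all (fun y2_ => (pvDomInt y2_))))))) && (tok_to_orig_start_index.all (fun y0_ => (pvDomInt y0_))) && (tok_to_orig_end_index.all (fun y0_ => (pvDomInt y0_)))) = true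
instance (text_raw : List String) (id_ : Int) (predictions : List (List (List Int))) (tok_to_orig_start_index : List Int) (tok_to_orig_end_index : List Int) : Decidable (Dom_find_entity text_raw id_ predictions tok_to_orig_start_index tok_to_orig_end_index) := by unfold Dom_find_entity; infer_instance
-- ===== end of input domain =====

-- B replaces A's per-match inner while-scan for trailing [1] positions by a single
-- backward pass precomputing all run lengths, then one run-table lookup per match (alternative algorithm).

-- ===== PORT A =====
-- A's inner loop:  while i + j + 1 < len(predictions): if [1] in predictions[i+j+1]: j += 1 else break
def pvWhileJ (predictions : List (List (List Int))) (i j : Int) : Int :=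
  if _h : i + j + 1 < (predictions.length : Int) then
    if (PySem.List.pyGetD predictions (i + j + 1) []).contains ([1] : List Int) then
      pvWhileJ predictions i (j + 1)
    else j
  else j
termination_by ((predictions.length : Int) - (i + j + 1)).toNat
decreasing_by omega

def find_entity (text_raw : List String) (id_ : Int) (predictions : List (List (List Int))) (tok_to_orig_start_index : List Int) (tok_to_orig_end_index : List Int) : List String :=
  let entity_list := (PySem.List.pyRange 0 (predictions.length : Int) 1).foldl
    (fun acc i =>
      if (PySem.List.pyGetD predictions i []).contains ([id_] : List Int) then
        let j := pvWhileJ predictions i 0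
        acc ++ [PySem.Str.join "" (PySem.List.slice text_raw
            (some (PySem.List.pyGetD tok_to_orig_start_index i 0))
            (some (PySem.List.pyGetD tok_to_orig_end_index (i + j) 0 + 1)))]
      else acc) []
  PySem.Set.ofList entity_list

-- ===== PORT B =====
-- B's backward pass:  run = [0]; for p in reversed(predictions): run.append(run[-1]+1 if [1] in p else 0); run.reverse()
def pvBuildRun : List (List (List Int)) → List Int
  | [] => [0]
  | p :: rest =>
    let r := pvBuildRun rest
    (if p.contains ([1] : List Int) then r.headD 0 + 1 else 0) :: r

def find_entity_alt (text_raw : List String) (id_ : Int) (predictions : List (List (List Int))) (tok_to_orig_start_index : List Int) (tok_to_orig_end_index : List Int) : List String :=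
  let run := pvBuildRun predictions
  let entity_list := (PySem.List.enumerate predictions 0).foldl
    (fun acc ip =>
      if ip.2.contains ([id_] : List Int) then
        let j := PySem.List.pyGetD run (ip.1 + 1) 0
        acc ++ [PySem.Str.join "" (PySem.List.slice text_raw
            (some (PySem.List.pyGetD tok_to_orig_start_index ip.1 0))
            (some (PySem.List.pyGetD tok_to_orig_end_index (ip.1 + j) 0 + 1)))]
      else acc) []
  PySem.Set.ofList entity_list

-- ===== PRECONDITION & SPEC =====
-- Pre_ excludes exactly the inputs on which A raises IndexError: a predicate match at
-- position i whose start index i, or whose span end i+j (k below ranges over the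
-- [1]-run ends reachable from i, the largest being i+j), falls past a token-index array.
def Pre_find_entity (text_raw : List String) (id_ : Int) (predictions : List (List (List Int))) (tok_to_orig_start_index : List Int) (tok_to_orig_end_index : List Int) : Prop :=
  ∀ i < predictions.length, ([id_] : List Int) ∈ predictions.getD i [] →
    i < tok_to_orig_start_index.length ∧
    ∀ k < predictions.length, i ≤ k →
      ((List.range predictions.length).all fun m =>
        decide (m ≤ i) || decide (k < m) || (predictions.getD m []).contains ([1] : List Int)) = true →
      k < tok_to_orig_end_index.length
instance (text_raw : List String) (id_ : Int) (predictions : List (List (List Int))) (tok_to_orig_start_index : List Int) (tok_to_orig_end_index : List Int) : Decidable (Pre_find_entity text_raw id_ predictions tok_to_orig_start_index tok_to_orig_end_index) := by unfold Pre_find_entity; infer_instance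

def pvWitness_find_entity : List String × Int × List (List (List Int)) × List Int × List Int :=
  (["a", "b"], 3, [[[3]], [[1]]], [0, 0], [0, 1])

def Spec_find_entity (text_raw : List String) (id_ : Int) (predictions : List (List (List Int))) (tok_to_orig_start_index : List Int) (tok_to_orig_end_index : List Int) (out : List String) : Prop := out = find_entity_alt text_raw id_ predictions tok_to_orig_start_index tok_to_orig_end_index
instance (text_raw : List String) (id_ : Int) (predictions : List (List (List Int))) (tok_to_orig_start_index : List Int) (tok_to_orig_end_index : List Int) (out : List String) : Decidable (Spec_find_entity text_raw id_ predictions tok_to_orig_start_index tok_to_orig_end_index out) := by unfold Spec_find_entity; infer_instance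

-- ===== CLAIM (what is proved, stated in full; the proofs are below) =====
def Claim_equal_find_entity : Prop := ∀ (text_raw : List String) (id_ : Int) (predictions : List (List (List Int))) (tok_to_orig_start_index : List Int) (tok_to_orig_end_index : List Int), Dom_find_entity text_raw id_ predictions tok_to_orig_start_index tok_to_orig_end_index → Pre_find_entity text_raw id_ predictions tok_to_orig_start_index tok_to_orig_end_index → Spec_find_entity text_raw id_ predictions tok_to_orig_start_index tok_to_orig_end_index (find_entity text_raw id_ predictions tok_to_orig_start_index tok_to_orig_end_index)

-- ===== LEMMAS AND PROOFS =====

-- run table entry k is the length of the consecutive [1]-run of predictions starting at k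
theorem pvBuildRun_getD (l : List (List (List Int))) :
    ∀ k : Nat, (pvBuildRun l).getD k 0 =
      (((l.drop k).takeWhile (fun p => p.contains ([1] : List Int))).length : Int) := by
  induction l with
  | nil => intro k; cases k <;> simp [pvBuildRun]
  | cons p rest ih =>
    intro k
    cases k with
    | zero =>
      have h0 := ih 0
      rw [show (pvBuildRun rest).getD 0 0 = (pvBuildRun rest).head?.getD 0 by
        cases pvBuildRun rest <;> rfl] at h0
      simp only [List.drop_zero] at h0 ⊢
      by_cases hc : [1] ∈ p
      · simp [pvBuildRun, hc, h0]
      · simp [pvBuildRun, hc]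
    | succ n =>
      simp only [pvBuildRun, List.getD_cons_succ, List.drop_succ_cons]
      exact ih n

-- A's while loop computes j plus the length of the [1]-run starting at position i+j+1
theorem pvWhileJ_eq (preds : List (List (List Int))) (i j : Int) (hi : 0 ≤ i) (hj : 0 ≤ j) :
    pvWhileJ preds i j =
      j + (((preds.drop ((i + j + 1).toNat)).takeWhile (fun p => p.contains ([1] : List Int))).length : Int) := by
  revert hj
  fun_induction pvWhileJ preds i j with
  | case1 j h hc ih =>
    intro hj
    have hk : (i + j + 1).toNat < preds.length := by omega
    have hg : PySem.List.pyGetD preds (i + j + 1) [] = preds[(i + j + 1).toNat] :=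
      PySem.List.pyGetD_eq_getElem _ _ (by omega) h
    rw [hg] at hc
    rw [ih (by omega), show (i + (j + 1) + 1).toNat = (i + j + 1).toNat + 1 from by omega,
      List.drop_eq_getElem_cons hk, List.takeWhile_cons, if_pos hc]
    simp only [List.length_cons]
    push_cast
    ring
  | case2 j h hc =>
    intro hj
    have hk : (i + j + 1).toNat < preds.length := by omega
    have hg : PySem.List.pyGetD preds (i + j + 1) [] = preds[(i + j + 1).toNat] :=
      PySem.List.pyGetD_eq_getElem _ _ (by omega) h
    rw [hg] at hc
    rw [List.drop_eq_getElem_cons hk, List.takeWhile_cons, if_neg (by simpa using hc)]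
    simp
  | case3 j h =>
    intro hj
    rw [List.drop_eq_nil_of_le (by omega : preds.length ≤ (i + j + 1).toNat)]
    simp

-- per matched index, A's inner scan result equals B's run-table lookup
theorem pvJ_agree (preds : List (List (List Int))) (k : Nat) :
    pvWhileJ preds (k : Int) 0 = PySem.List.pyGetD (pvBuildRun preds) ((k : Int) + 1) 0 := by
  rw [pvWhileJ_eq preds (k : Int) 0 (by positivity) le_rfl,
    show ((k : Int) + 1) = ((k + 1 : Nat) : Int) from by push_cast; ring,
    PySem.List.pyGetD_natCast, pvBuildRun_getD,
    show ((k : Int) + 0 + 1).toNat = k + 1 from by omega]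
  ring

-- ===== VERDICT (by name: the statement is the Claim_ definition above) =====
theorem find_entity_spec : Claim_equal_find_entity := by
  intro text_raw id_ predictions st en _ _
  unfold Spec_find_entity find_entity find_entity_alt
  rw [PySem.List.enumerate_eq_map_pyRange predictions ([] : List (List Int))]
  simp only [List.foldl_map, PySem.List.len_eq]
  refine congrArg PySem.Set.ofList ?_
  refine PySem.List.foldl_congr_mem _ _ _ _ ?_
  intro acc i hi
  obtain ⟨h0, h1⟩ := PySem.List.mem_pyRange_one.mp hi
  obtain ⟨k, rfl⟩ : ∃ k : Nat, i = (k : Int) := ⟨i.toNat, by omega⟩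
  simp only [pvJ_agree]
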